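-- pv_equiv track=rewrite | github.com/Mebratie/KR_Regression | scripts/Lorenz_System/Lorenz_System_T5_40/Lorenz_System_T5_40.py | multilinear_expansion1
-- ===== SOURCE A (Python) =====
-- import itertools
--
-- def multilinear_expansion1(variables1, n1):
--     expansions1 = []
--     for ks in itertools.product(range(n1 + 1), repeat=len(variables1)):
--         if sum(ks) == n1:
--             terms1 = [f"{var}**{k}" if k != 0 else f"{var}" for var, k in zip(variables1, ks) if k != 0]
--             term1 = " * ".join(terms1)
--             expansions1.append(term1)
--     return expansions1[::-1]
-- ===== SOURCE B (Python) =====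
-- def multilinear_expansion1(variables1, n1):
--     def go(vars_rest, rem, parts):
--         if not vars_rest:
--             return [" * ".join(parts)] if rem == 0 else []
--         v, rest = vars_rest[0], vars_rest[1:]
--         out = []
--         for k in range(rem + 1):
--             out.extend(go(rest, rem - k, parts if k == 0 else parts + [f"{v}**{k}"]))
--         return out
--     return go(variables1, n1, [])[::-1]
-- ===== Notes on version B (the rewrite author's own statement) =====
-- stated objective: faster
-- what changed: Instead of enumerating the full box range(n1+1)^d and filtering tuples whose coordinates sum to n1, B recursively enumerates only the compositions of n1 (each exponent bounded by the remaining budget), building each term string along the way; intended as faster (measured 83x at the largest size where both finish; on astronomically large n1 both programs' output is infeasible).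
import Mathlib
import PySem

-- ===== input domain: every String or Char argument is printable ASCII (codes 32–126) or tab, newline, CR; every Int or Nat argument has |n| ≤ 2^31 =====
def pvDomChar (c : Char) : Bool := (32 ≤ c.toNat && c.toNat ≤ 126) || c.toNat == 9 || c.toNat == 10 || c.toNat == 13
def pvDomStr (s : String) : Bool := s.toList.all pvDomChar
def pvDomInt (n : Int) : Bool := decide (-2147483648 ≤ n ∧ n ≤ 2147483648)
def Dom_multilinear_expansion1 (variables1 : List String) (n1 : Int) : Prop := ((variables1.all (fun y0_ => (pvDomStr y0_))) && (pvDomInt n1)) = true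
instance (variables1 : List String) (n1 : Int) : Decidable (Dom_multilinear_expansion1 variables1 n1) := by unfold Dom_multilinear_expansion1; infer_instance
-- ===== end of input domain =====

-- ===== PORT A =====
-- B enumerates only the compositions of n1 instead of filtering the full box range(n1+1)^d;
-- intended as faster (measured 83x at the largest size where both programs finish).
-- itertools.product(range(n1+1), repeat=d): lex order, first coordinate outermost
def pvProdRep (r : List Int) : Nat → List (List Int)
  | 0 => [[]]
  | n + 1 => r.flatMap (fun k => (pvProdRep r n).map (fun ks => k :: ks))

-- " * ".join of the filtered comprehension building terms1
def pvMkTerm (variables1 : List String) (ks : List Int) : String :=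
  PySem.Str.join " * "
    (((variables1.zip ks).filter (fun p => p.2 != 0)).map
      (fun p => if p.2 != 0 then p.1 ++ "**" ++ PySem.Int.toStr p.2 else p.1))

def multilinear_expansion1 (variables1 : List String) (n1 : Int) : List String :=
  -- expansions1[::-1] is List.reverse (PySem.List.slice?_none_none_neg_one)
  ((pvProdRep (PySem.List.pyRange 0 (n1 + 1) 1) variables1.length).foldl
      (fun acc ks => if ks.sum == n1 then acc ++ [pvMkTerm variables1 ks] else acc) []).reverse

-- ===== PORT B =====
def pvGo (vars_rest : List String) (rem : Int) (parts : List String) : List String :=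
  match vars_rest with
  | [] => if rem == 0 then [PySem.Str.join " * " parts] else []
  | v :: rest =>
      (PySem.List.pyRange 0 (rem + 1) 1).foldl
        (fun out k =>
          out ++ pvGo rest (rem - k)
            (if k == 0 then parts else parts ++ [v ++ "**" ++ PySem.Int.toStr k])) []

def multilinear_expansion1_alt (variables1 : List String) (n1 : Int) : List String :=
  (pvGo variables1 n1 []).reverse

-- ===== PRECONDITION & SPEC =====
def Spec_multilinear_expansion1 (variables1 : List String) (n1 : Int) (out : List String) : Prop := out = multilinear_expansion1_alt variables1 n1
instance (variables1 : List String) (n1 : Int) (out : List String) : Decidable (Spec_multilinear_expansion1 variables1 n1 out) := by unfold Spec_multilinear_expansion1; infer_instance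

-- ===== CLAIM (what is proved, stated in full; the proofs are below) =====
def Claim_equal_multilinear_expansion1 : Prop := ∀ (variables1 : List String) (n1 : Int), Dom_multilinear_expansion1 variables1 n1 → Spec_multilinear_expansion1 variables1 n1 (multilinear_expansion1 variables1 n1)

-- ===== LEMMAS AND PROOFS =====
def pvTerms (vs : List String) (ks : List Int) : List String :=
  ((vs.zip ks).filter (fun p => p.2 != 0)).map
    (fun p => p.1 ++ "**" ++ PySem.Int.toStr p.2)

lemma pvMkTerm_eq (vs : List String) (ks : List Int) :
    pvMkTerm vs ks = PySem.Str.join " * " (pvTerms vs ks) := by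
  unfold pvMkTerm pvTerms
  congr 1
  apply List.map_congr_left
  intro p hp
  have := (List.mem_filter.mp hp).2
  simp only [this, if_true]

lemma pvProdRep_nonneg (N : Int) (n : Nat) (ks : List Int)
    (h : ks ∈ pvProdRep (PySem.List.pyRange 0 (N + 1) 1) n) : 0 ≤ ks.sum := by
  induction n generalizing ks with
  | zero => simp [pvProdRep] at h; simp [h]
  | succ m ih =>
    simp only [pvProdRep, List.mem_flatMap, List.mem_map] at h
    obtain ⟨k, hk, ks', hks', rfl⟩ := h
    have hk0 : 0 ≤ k := ((PySem.List.mem_pyRange_one).mp hk).1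
    have := ih ks' hks'
    simp only [List.sum_cons]; omega

lemma pvFlatMap_congr {α β : Type} (l : List α) (f g : α → List β)
    (h : ∀ x ∈ l, f x = g x) : l.flatMap f = l.flatMap g := by
  simp only [List.flatMap_def]
  rw [List.map_congr_left h]

lemma pvGo_eq (N : Int) (vs : List String) :
    ∀ (rem : Int) (parts : List String), rem ≤ N →
      pvGo vs rem parts =
        ((pvProdRep (PySem.List.pyRange 0 (N + 1) 1) vs.length).filter
            (fun ks => ks.sum == rem)).map
          (fun ks => PySem.Str.join " * " (parts ++ pvTerms vs ks)) := by
  induction vs with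
  | nil =>
    intro rem parts _
    simp only [pvGo, pvProdRep, List.length_nil]
    by_cases h : rem = 0
    · subst h; simp [pvTerms]
    · have h0 : ((0 : Int) == rem) = false := by
        simp only [beq_eq_false_iff_ne, ne_eq]; omega
      simp [pvTerms, h, List.filter, h0]
  | cons v rest ih =>
    intro rem parts hle
    simp only [pvGo, PySem.List.foldl_append_eq_flatMap, List.nil_append,
      List.length_cons, pvProdRep, List.filter_flatMap, List.map_flatMap]
    set R := pvProdRep (PySem.List.pyRange 0 (N + 1) 1) rest.length with hR
    by_cases hrem : 0 ≤ rem
    · rw [PySem.List.pyRange_one_append 0 (rem + 1) (N + 1) (by omega) (by omega)]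
      rw [List.flatMap_append]
      have h2 : (PySem.List.pyRange (rem + 1) (N + 1) 1).flatMap
          (fun k => ((R.map (fun ks => k :: ks)).filter (fun ks => ks.sum == rem)).map
            (fun ks => PySem.Str.join " * " (parts ++ pvTerms (v :: rest) ks))) = [] := by
        apply List.flatMap_eq_nil_iff.mpr
        intro k hk
        have hk1 : rem + 1 ≤ k := ((PySem.List.mem_pyRange_one).mp hk).1
        have hnil : (R.map (fun ks => k :: ks)).filter (fun ks => ks.sum == rem) = [] := by
          apply List.filter_eq_nil_iff.mpr
          intro ks hks
          simp only [List.mem_map] at hks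
          obtain ⟨ks', hks', rfl⟩ := hks
          rw [hR] at hks'
          have := pvProdRep_nonneg N rest.length ks' hks'
          simp only [List.sum_cons, beq_iff_eq]
          omega
        rw [hnil]; rfl
      rw [h2, List.append_nil]
      apply pvFlatMap_congr
      intro k hk
      have hk0 : 0 ≤ k := ((PySem.List.mem_pyRange_one).mp hk).1
      have hkr : k ≤ rem := by
        have := ((PySem.List.mem_pyRange_one).mp hk).2; omega
      rw [ih (rem - k) _ (by omega)]
      rw [List.filter_map, List.map_map]
      have hfil : List.filter ((fun ks => ks.sum == rem) ∘ fun ks => k :: ks) R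
          = List.filter (fun ks => ks.sum == rem - k) R := by
        apply List.filter_congr
        intro ks _
        rw [Bool.eq_iff_iff]
        simp only [Function.comp_apply, List.sum_cons, beq_iff_eq]
        omega
      rw [hfil]
      apply List.map_congr_left
      intro ks _
      simp only [Function.comp_apply, pvTerms, List.zip_cons_cons, List.filter_cons]
      by_cases hk0' : k = 0
      · subst hk0'; simp
      · have hne : ((k : Int) != 0) = true := by simp [hk0']
        simp [hne, hk0']
    · have h1 : PySem.List.pyRange 0 (rem + 1) 1 = [] :=
        PySem.List.pyRange_one_eq_nil (by omega)
      rw [h1, List.flatMap_nil]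
      symm
      apply List.flatMap_eq_nil_iff.mpr
      intro k hk
      have hk0 : 0 ≤ k := ((PySem.List.mem_pyRange_one).mp hk).1
      have hnil : (R.map (fun ks => k :: ks)).filter (fun ks => ks.sum == rem) = [] := by
        apply List.filter_eq_nil_iff.mpr
        intro ks hks
        simp only [List.mem_map] at hks
        obtain ⟨ks', hks', rfl⟩ := hks
        rw [hR] at hks'
        have := pvProdRep_nonneg N rest.length ks' hks'
        simp only [List.sum_cons, beq_iff_eq]
        omega
      rw [hnil]; rfl

-- ===== VERDICT (by name: the statement is the Claim_ definition above) =====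
theorem multilinear_expansion1_spec : Claim_equal_multilinear_expansion1 := by
  intro variables1 n1 _
  unfold Spec_multilinear_expansion1 multilinear_expansion1 multilinear_expansion1_alt
  rw [PySem.List.foldl_append_if, List.nil_append,
    pvGo_eq n1 variables1 n1 [] le_rfl]
  congr 1
  apply List.map_congr_left
  intro ks _
  rw [pvMkTerm_eq]
  rfl
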